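-- pv_equiv track=rewrite | github.com/nagybalint/advent-of-code-2020 | day_16/task2.py | finalize_fields
-- ===== SOURCE A (Python) =====
-- from typing import Callable, Dict, IO, List, Tuple
--
-- def finalize_fields(field_candidates):
--     final_field_indices = {}
--     while True:
--         for i, c in enumerate(field_candidates):
--             if len(c) == 1:
--                 final_field_indices[c[0]] = i
--                 remove_candidate(field_candidates, c[0])
--                 break
--         else:
--             break
--     return final_field_indices
--
-- def remove_candidate(field_candidates: List[List[str]], c):
--     for cand in field_candidates:
--         try:
--             cand.remove(c)
--         except:
--             pass
-- ===== SOURCE B (Python) =====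
-- # Worklist propagation with a reverse value->fields index: singleton fields are
-- # discovered via a sorted pending queue (lowest index first) and each assigned
-- # value only touches the fields that contain it, instead of A's whole-table
-- # rescan and remove per round.  (A mutates field_candidates in place; B does
-- # not -- the equivalence is about the return value only.)
-- def _insort(pending, j):
--     lo = 0
--     while lo < len(pending) and pending[lo] <= j:
--         lo += 1
--     pending.insert(lo, j)
--
-- def finalize_fields(field_candidates):
--     cnts, lens = [], []
--     rev = {}
--     for c in field_candidates:
--         d = {}
--         for v in c:
--             d[v] = d.get(v, 0) + 1
--         for v in d:
--             rev.setdefault(v, []).append(len(lens))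
--         cnts.append(d)
--         lens.append(len(c))
--     pending = [i for i in range(len(field_candidates)) if lens[i] == 1]
--     result = {}
--     while pending:
--         i = pending.pop(0)
--         if lens[i] != 1:
--             continue
--         v = next(iter(cnts[i]))
--         result[v] = i
--         for j in rev[v]:
--             d = cnts[j]
--             if v in d:
--                 d[v] -= 1
--                 lens[j] -= 1
--                 if d[v] == 0:
--                     del d[v]
--                 if lens[j] == 1:
--                     _insort(pending, j)
--     return result
-- ===== Notes on version B (the rewrite author's own statement) =====
-- stated objective: alternative
-- what changed: B replaces A's repeated whole-table rescans (scan all fields for a singleton, then remove the value from every list) by worklist propagation: per-field counters and a reverse value-to-fields index are built once, singleton fields are discovered through a sorted pending queue popped lowest-index-first, and each assigned value only decrements the counters of the fields its reverse-index entry names.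
import Mathlib
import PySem

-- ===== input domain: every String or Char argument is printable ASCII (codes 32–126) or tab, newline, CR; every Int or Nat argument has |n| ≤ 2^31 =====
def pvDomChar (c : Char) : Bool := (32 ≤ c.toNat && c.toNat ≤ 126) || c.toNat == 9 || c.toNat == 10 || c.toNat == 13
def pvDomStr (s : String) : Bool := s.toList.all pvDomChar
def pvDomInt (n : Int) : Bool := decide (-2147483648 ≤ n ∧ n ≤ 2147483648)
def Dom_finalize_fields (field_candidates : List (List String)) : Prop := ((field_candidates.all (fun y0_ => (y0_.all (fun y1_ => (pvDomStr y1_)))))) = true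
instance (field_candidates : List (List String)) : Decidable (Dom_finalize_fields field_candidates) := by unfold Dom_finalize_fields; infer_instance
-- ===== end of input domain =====

-- B replaces A's per-round whole-table rescan and remove by worklist propagation:
-- per-field counters and a reverse value→fields index built once, a sorted pending
-- queue of singleton fields popped lowest-index-first, decrements only on the
-- fields the reverse index names (objective: alternative algorithm).
-- A mutates its argument in place, B does not: the equivalence proved here is
-- about the return value only.

-- ===== PORT A =====
-- 'for i, c in enumerate(field_candidates): if len(c) == 1: break' — first (i, c) with len 1
def pvFindSingleton : List (List String) → Option (Nat × List String)
  | [] => none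
  | c :: rest =>
    if c.length == 1 then some (0, c)
    else (pvFindSingleton rest).map (fun p => (p.1 + 1, p.2))
-- 'for cand in field_candidates: try: cand.remove(c) except: pass'
def remove_candidate (field_candidates : List (List String)) (c : String) : List (List String) :=
  field_candidates.map (fun cand => ((PySem.List.remove? cand c).getD cand))
def pvSumLen (fcs : List (List String)) : Nat := (fcs.map List.length).sum
-- facts cited by pvALoop's decreasing_by, so they stay above the claim block
theorem pvRemLen_le (l : List String) (v : String) :
    ((PySem.List.remove? l v).getD l).length ≤ l.length := by
  by_cases hv : v ∈ l
  · rw [PySem.List.remove?_eq_some_erase l v hv]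
    simp [List.length_erase_of_mem hv]
  · rw [(PySem.List.remove?_eq_none_iff l v).mpr hv]
    simp

theorem pvFindSingleton_spec (fcs : List (List String)) (i : Nat) (c : List String)
    (h : pvFindSingleton fcs = some (i, c)) :
    fcs[i]? = some c ∧ c.length = 1 ∧
      (∀ j, j < i → ∀ c', fcs[j]? = some c' → c'.length ≠ 1) := by
  induction fcs generalizing i c with
  | nil => simp [pvFindSingleton] at h
  | cons c0 rest ih =>
    rw [pvFindSingleton] at h
    by_cases h1 : (c0.length == 1) = true
    · rw [if_pos h1] at h
      obtain ⟨hi, hc⟩ := Prod.mk.injEq .. ▸ Option.some.inj h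
      subst hi; subst hc
      exact ⟨rfl, by simpa using h1, by omega⟩
    · rw [if_neg h1] at h
      rw [Option.map_eq_some_iff] at h
      obtain ⟨⟨j, d⟩, hjd, hp⟩ := h
      have hi : i = j + 1 := (Prod.mk.injEq .. ▸ hp).1.symm
      have hc : c = d := (Prod.mk.injEq .. ▸ hp).2.symm
      subst hc
      obtain ⟨hg, hl, hmin⟩ := ih j c hjd
      subst hi
      refine ⟨by simpa using hg, hl, ?_⟩
      intro k hk c' hc'
      cases k with
      | zero =>
        simp only [List.getElem?_cons_zero, Option.some.injEq] at hc'
        subst hc'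
        simpa using h1
      | succ k' =>
        simp only [List.getElem?_cons_succ] at hc'
        exact hmin k' (by omega) c' hc'

theorem pvRemove_decreases (fcs : List (List String)) (i : Nat) (c : List String)
    (h : pvFindSingleton fcs = some (i, c)) :
    pvSumLen (remove_candidate fcs (c.headD "")) < pvSumLen fcs := by
  obtain ⟨hg, hl, -⟩ := pvFindSingleton_spec fcs i c h
  obtain ⟨x, hx⟩ : ∃ x, c = [x] := by
    cases c with
    | nil => simp at hl
    | cons a t => cases t with
      | nil => exact ⟨a, rfl⟩
      | cons b t' => simp at hl
  subst hx
  have hmem : [x] ∈ fcs := by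
    exact List.mem_of_getElem? hg
  clear h hg hl
  induction fcs with
  | nil => simp at hmem
  | cons c0 rest ih =>
    simp only [remove_candidate, pvSumLen, List.map_cons, List.sum_cons] at *
    rcases List.mem_cons.mp hmem with h0 | h0
    · have : ((PySem.List.remove? c0 ([x].headD "")).getD c0).length < c0.length := by
        subst h0
        have : ([x].headD "") = x := rfl
        rw [this, PySem.List.remove?_eq_some_erase [x] x (by simp)]
        simp
      have hrest : ((rest.map (fun cand => (PySem.List.remove? cand ([x].headD "")).getD cand)).map List.length).sum
          ≤ (rest.map List.length).sum := by
        clear ih hmem this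
        induction rest with
        | nil => simp
        | cons r rs ihr =>
          simp only [List.map_cons, List.sum_cons]
          have := pvRemLen_le r ([x].headD "")
          omega
      simp only [List.map_map, Function.comp_def] at *
      omega
    · have := ih h0
      have := pvRemLen_le c0 ([x].headD "")
      simp only [List.map_map, Function.comp_def] at *
      omega

-- the 'while True' loop of A, recursing on the strictly shrinking total size
def pvALoop (fcs : List (List String)) (res : PySem.Dict String Int) : PySem.Dict String Int :=
  match h : pvFindSingleton fcs with
  | none => res
  | some (i, c) =>
    let v := c.headD ""
    pvALoop (remove_candidate fcs v) (res.insert v (i : Int))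
  termination_by pvSumLen fcs
  decreasing_by exact pvRemove_decreases fcs i c h
def finalize_fields (field_candidates : List (List String)) : List (String × Int) :=
  (pvALoop field_candidates PySem.Dict.empty).items

-- ===== PORT B =====
-- 'd = {}; for v in c: d[v] = d.get(v, 0) + 1'
def pvCounter (c : List String) : PySem.Dict String Int :=
  c.foldl (fun d x => d.insert x (d.getD x 0 + 1)) PySem.Dict.empty
-- the build loop: counters, lengths and the reverse index rev[v] = fields containing v
def pvInit (fcs : List (List String)) :
    List (PySem.Dict String Int) × List Int × PySem.Dict String (List Nat) :=
  fcs.foldl (fun st c =>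
    let d := pvCounter c
    -- 'for v in d: rev.setdefault(v, []).append(len(lens))'
    let rev' := d.keys.foldl (fun r v => r.insert v (r.getD v [] ++ [st.2.1.length])) st.2.2
    (st.1 ++ [d], st.2.1 ++ [(c.length : Int)], rev'))
    ([], [], PySem.Dict.empty)
-- '_insort(pending, j)': linear scan for the insertion point
def pvInsort (pending : List Nat) (j : Nat) : List Nat :=
  match pending with
  | [] => [j]
  | h :: t => if h ≤ j then h :: pvInsort t j else j :: h :: t
-- body of 'for j in rev[v]: …' — decrement cnts[j][v]/lens[j], queue new singletons
def pvRelax (v : String) (st : List (PySem.Dict String Int) × List Int × List Nat)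
    (j : Nat) : List (PySem.Dict String Int) × List Int × List Nat :=
  let d := st.1.getD j PySem.Dict.empty
  if d.contains v then
    let k := d.getD v 0 - 1
    let d' := if k == 0 then (d.insert v k).erase v else d.insert v k
    let lens' := st.2.1.modify j (· - 1)
    let pend' := if lens'.getD j 0 == 1 then pvInsort st.2.2 j else st.2.2
    (st.1.set j d', lens', pend')
  else st
-- the 'while pending' loop; the fuel only bounds the number of iterations
-- (pvSumLen fcs * (fcs.length + 1) + fcs.length + 1 always suffices, proved below)
def pvBLoop (fuel : Nat) (cnts : List (PySem.Dict String Int)) (lens : List Int)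
    (rev : PySem.Dict String (List Nat)) (pending : List Nat)
    (res : PySem.Dict String Int) : PySem.Dict String Int :=
  match fuel, pending with
  | 0, _ => res
  | _ + 1, [] => res
  | fuel + 1, i :: t =>
    if lens.getD i 0 == 1 then
      let v := ((cnts.getD i PySem.Dict.empty).keys).headD ""
      let st := (rev.getD v []).foldl (pvRelax v) (cnts, lens, t)
      pvBLoop fuel st.1 st.2.1 rev st.2.2 (res.insert v (i : Int))
    else pvBLoop fuel cnts lens rev t res
def finalize_fields_alt (field_candidates : List (List String)) : List (String × Int) :=
  let st := pvInit field_candidates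
  let pending := (List.range field_candidates.length).filter
    (fun i => st.2.1.getD i 0 == 1)
  (pvBLoop (pvSumLen field_candidates * (field_candidates.length + 1) + field_candidates.length + 1)
    st.1 st.2.1 st.2.2 pending PySem.Dict.empty).items

-- ===== PRECONDITION & SPEC =====
def Spec_finalize_fields (field_candidates : List (List String)) (out : List (String × Int)) : Prop := out = finalize_fields_alt field_candidates
instance (field_candidates : List (List String)) (out : List (String × Int)) : Decidable (Spec_finalize_fields field_candidates out) := by unfold Spec_finalize_fields; infer_instance

-- ===== CLAIM (what is proved, stated in full; the proofs are below) =====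
def Claim_equal_finalize_fields : Prop := ∀ (field_candidates : List (List String)), Dom_finalize_fields field_candidates → Spec_finalize_fields field_candidates (finalize_fields field_candidates)

-- ===== LEMMAS AND PROOFS =====

-- A-side characterisation reused from the counter correspondence: one candidate
-- list vs its counter dict
def pvDInv (c : List String) (d : PySem.Dict String Int) : Prop :=
  d.keys.Nodup ∧ (∀ v, d.getD v 0 = c.count v) ∧ (∀ v ∈ d.keys, v ∈ c)
-- abstract one-field decrement (B's pvRelax at one index, A's removal of v)
def pvDecr (v : String) (p : PySem.Dict String Int × Int) : PySem.Dict String Int × Int :=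
  if p.1.contains v then
    let k := p.1.getD v 0 - 1
    let d' := p.1.insert v k
    (if k == 0 then d'.erase v else d', p.2 - 1)
  else p

theorem pvFindSingleton_none (fcs : List (List String))
    (h : pvFindSingleton fcs = none) :
    ∀ (j : Nat) (c : List String), fcs[j]? = some c → c.length ≠ 1 := by
  induction fcs with
  | nil => intro j c hc; simp at hc
  | cons c0 rest ih =>
    rw [pvFindSingleton] at h
    by_cases h1 : (c0.length == 1) = true
    · simp [h1] at h
    · rw [if_neg h1] at h
      intro j c hc
      cases j with
      | zero =>
        simp only [List.getElem?_cons_zero, Option.some.injEq] at hc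
        subst hc; simpa using h1
      | succ j' =>
        simp only [List.getElem?_cons_succ] at hc
        exact ih (by simpa using h) j' c hc

theorem pvGetD_erase_self (d : PySem.Dict String Int) (k : String) (d0 : Int) :
    (d.erase k).getD k d0 = d0 := by
  rcases d with ⟨items⟩
  have : List.find? (fun p => p.1 == k) (items.filter (fun p => !(p.1 == k))) = none := by
    rw [List.find?_eq_none]
    intro p hp
    simp at hp ⊢
    exact hp.2
  simp [PySem.Dict.erase, PySem.Dict.getD, PySem.Dict.get?, this]

theorem pvGetD_erase_of_ne (d : PySem.Dict String Int) (k k' : String) (d0 : Int)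
    (h : k' ≠ k) : (d.erase k).getD k' d0 = d.getD k' d0 := by
  rcases d with ⟨items⟩
  have : List.find? (fun p => p.1 == k') (items.filter (fun p => !(p.1 == k)))
       = List.find? (fun p => p.1 == k') items := by
    induction items with
    | nil => rfl
    | cons p rest ih =>
      by_cases hp : p.1 = k
      · have hb1 : (p.1 == k) = true := by simp [hp]
        have hb2 : (p.1 == k') = false := by simp [hp, Ne.symm h]
        simp [List.filter, List.find?, hb1, hb2, ih]
      · have hb1 : (p.1 == k) = false := by simp [hp]
        by_cases hq : p.1 = k'
        · have hb2 : (p.1 == k') = true := by simp [hq]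
          simp [List.filter, List.find?, hb1, hb2]
        · have hb2 : (p.1 == k') = false := by simp [hq]
          simp [List.filter, List.find?, hb1, hb2, ih]
  simp [PySem.Dict.erase, PySem.Dict.getD, PySem.Dict.get?, this]

theorem pvKeys_erase (d : PySem.Dict String Int) (k : String) :
    (d.erase k).keys = d.keys.filter (fun x => x ≠ k) := by
  rcases d with ⟨items⟩
  simp only [PySem.Dict.erase, PySem.Dict.keys]
  induction items with
  | nil => rfl
  | cons p rest ih =>
    by_cases hp : p.1 = k
    · have hb : (p.1 == k) = true := by simp [hp]
      simp [List.filter, hb, ih, hp]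
    · have hb : (p.1 == k) = false := by simp [hp]
      simp [List.filter, hb, ih, hp]

-- one list's pvDInv is preserved by one removal of v
theorem pvDecr_inv (v : String) (c : List String) (d : PySem.Dict String Int) (l : Int)
    (hinv : pvDInv c d) (hl : l = (c.length : Int)) :
    pvDInv ((PySem.List.remove? c v).getD c) (pvDecr v (d, l)).1 ∧
    (pvDecr v (d, l)).2 = (((PySem.List.remove? c v).getD c).length : Int) := by
  obtain ⟨hnd, hcnt, hmem⟩ := hinv
  by_cases hvc : v ∈ c
  · have hcontains : d.contains v = true := by
      by_contra hc
      have hc' : d.contains v = false := by simpa using hc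
      have := PySem.Dict.getD_of_not_contains (d := d) (0 : Int) hc'
      have h1 := hcnt v
      have : (0 : Int) = c.count v := by omega
      have := List.count_pos_iff.mpr hvc
      omega
    have hrw : PySem.List.remove? c v = some (c.erase v) :=
      PySem.List.remove?_eq_some_erase c v hvc
    rw [hrw]
    set c' := c.erase v with hc'
    have hcntpos : 0 < c.count v := List.count_pos_iff.mpr hvc
    have hlenpos : 0 < c.length := List.length_pos_of_mem hvc
    have hlen' : c'.length = c.length - 1 := List.length_erase_of_mem hvc
    have hcv' : c'.count v = c.count v - 1 := List.count_erase_self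
    have hcw' : ∀ w, w ≠ v → c'.count w = c.count w := by
      intro w hw
      exact List.count_erase_of_ne hw
    have hk : d.getD v 0 - 1 = (c.count v : Int) - 1 := by rw [hcnt v]
    have hkeys' : (d.insert v (d.getD v 0 - 1)).keys = d.keys :=
      PySem.Dict.keys_insert_of_contains d _ hcontains
    simp only [pvDecr, hcontains, if_true]
    by_cases hk0 : (d.getD v 0 - 1 : Int) = 0
    · have hb : ((d.getD v 0 - 1 : Int) == 0) = true := by simp [hk0]
      simp only [hb, if_true, Option.getD_some]
      have hcnt1 : c.count v = 1 := by omega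
      constructor
      · refine ⟨?_, ?_, ?_⟩
        · rw [pvKeys_erase, hkeys']
          exact hnd.filter _
        · intro w
          by_cases hw : w = v
          · subst hw
            rw [pvGetD_erase_self]
            omega
          · rw [pvGetD_erase_of_ne _ _ _ _ hw, PySem.Dict.getD_insert_of_ne _ _ _ hw,
              hcnt w, hcw' w hw]
        · intro w hw
          rw [pvKeys_erase, hkeys'] at hw
          simp only [List.mem_filter, decide_eq_true_eq] at hw
          exact (List.mem_erase_of_ne hw.2).mpr (hmem w hw.1)
      · show l - 1 = (c'.length : Int)
        omega
    · have hb : ((d.getD v 0 - 1 : Int) == 0) = false := by simp [hk0]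
      simp only [hb, Bool.false_eq_true, if_false, Option.getD_some]
      constructor
      · refine ⟨?_, ?_, ?_⟩
        · rw [hkeys']; exact hnd
        · intro w
          by_cases hw : w = v
          · subst hw
            rw [PySem.Dict.getD_insert_self]
            omega
          · rw [PySem.Dict.getD_insert_of_ne _ _ _ hw, hcnt w, hcw' w hw]
        · intro w hw
          rw [hkeys'] at hw
          by_cases hwv : w = v
          · subst hwv
            have : 0 < c'.count w := by omega
            exact List.count_pos_iff.mp this
          · exact (List.mem_erase_of_ne hwv).mpr (hmem w hw)
      · show l - 1 = (c'.length : Int)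
        omega
  · have hcontains : d.contains v = false := by
      by_contra hc
      have hc' : d.contains v = true := by simpa using hc
      exact hvc (hmem v ((PySem.Dict.contains_iff_mem_keys d v).mp hc'))
    rw [(PySem.List.remove?_eq_none_iff c v).mpr hvc]
    simp [pvDecr, hcontains]
    exact ⟨⟨hnd, hcnt, hmem⟩, hl⟩

theorem pvDInv_counter (c : List String) : pvDInv c (pvCounter c) := by
  have hc : pvCounter c = PySem.Dict.counter c := PySem.Dict.foldl_insert_getD_add_one_eq_counter c
  rw [hc]
  refine ⟨PySem.Dict.nodup_keys_counter c, ?_, ?_⟩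
  · intro v; exact PySem.Dict.getD_counter c v
  · intro v hv
    rw [PySem.Dict.keys_counter] at hv
    exact (PySem.Set.mem_ofList c v).mp hv

-- the only key of a singleton list's counter is its element
theorem pvDInv_singleton_keys (x : String) (d : PySem.Dict String Int)
    (h : pvDInv [x] d) : d.keys = [x] := by
  obtain ⟨hnd, hcnt, hmem⟩ := h
  have hx : x ∈ d.keys := by
    by_contra hx
    have hc : d.contains x = false := by
      by_cases hc : d.contains x = true
      · exact absurd ((PySem.Dict.contains_iff_mem_keys d x).mp hc) hx
      · simpa using hc
    have h0 := PySem.Dict.getD_of_not_contains (d := d) (0 : Int) hc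
    have h1 := hcnt x
    simp [List.count_cons] at h1
    omega
  have hall : ∀ v ∈ d.keys, v = x := by
    intro v hv
    simpa using hmem v hv
  cases hk : d.keys with
  | nil => rw [hk] at hx; simp at hx
  | cons a t =>
    rw [hk] at hall hnd hx
    have ha : a = x := hall a (by simp)
    cases t with
    | nil => simp [ha]
    | cons b t' =>
      have hb : b = x := hall b (by simp)
      subst ha; subst hb
      simp at hnd

theorem pvForall₂_get? {α β : Type} (R : α → β → Prop) (l1 : List α) (l2 : List β)
    (i : Nat) (a : α) (h : List.Forall₂ R l1 l2) (ha : l1[i]? = some a) :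
    ∃ b, l2[i]? = some b ∧ R a b := by
  induction h generalizing i with
  | nil => simp at ha
  | cons hR hrest ih =>
    cases i with
    | zero => simp at ha ⊢; subst ha; exact hR
    | succ j =>
      simp only [List.getElem?_cons_succ] at ha ⊢
      exact ih j ha

-- ---------- pvInsort ----------
theorem pvInsort_mem (p : List Nat) (j x : Nat) :
    x ∈ pvInsort p j ↔ x = j ∨ x ∈ p := by
  induction p with
  | nil => simp [pvInsort]
  | cons h t ih =>
    rw [pvInsort]
    by_cases hc : h ≤ j <;> simp [hc, ih] <;> tauto

theorem pvInsort_length (p : List Nat) (j : Nat) :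
    (pvInsort p j).length = p.length + 1 := by
  induction p with
  | nil => rfl
  | cons h t ih =>
    rw [pvInsort]
    by_cases hc : h ≤ j
    · simp [hc, ih]
    · simp [hc]

theorem pvInsort_sorted (p : List Nat) (j : Nat) (h : List.Sorted (· ≤ ·) p) :
    List.Sorted (· ≤ ·) (pvInsort p j) := by
  induction p with
  | nil => simp [pvInsort, List.sorted_singleton]
  | cons a t ih =>
    rw [pvInsort]
    rw [List.sorted_cons] at h
    by_cases hc : a ≤ j
    · rw [if_pos hc, List.sorted_cons]
      refine ⟨?_, ih h.2⟩
      intro b hb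
      rcases (pvInsort_mem t j b).mp hb with hb | hb
      · omega
      · exact h.1 b hb
    · rw [if_neg hc, List.sorted_cons]
      refine ⟨?_, List.sorted_cons.mpr h⟩
      intro b hb
      rcases List.mem_cons.mp hb with hb | hb
      · omega
      · have := h.1 b hb; omega

-- ---------- pvInit ----------
-- which indices (from m) the reverse index records for v
def pvRevSpec (v : String) (m : Nat) : List (List String) → List Nat
  | [] => []
  | c :: rest => (if v ∈ c then [m] else []) ++ pvRevSpec v (m + 1) rest

theorem pvRevSpec_mem (v : String) (fcs : List (List String)) (m x : Nat) :
    x ∈ pvRevSpec v m fcs ↔ ∃ (k : Nat), x = m + k ∧ ∃ c, fcs[k]? = some c ∧ v ∈ c := by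
  induction fcs generalizing m with
  | nil => simp [pvRevSpec]
  | cons c rest ih =>
    rw [pvRevSpec]
    constructor
    · intro hx
      rcases List.mem_append.mp hx with hx | hx
      · refine ⟨0, by split at hx <;> simp_all, c, by simp, ?_⟩
        split at hx <;> simp_all
      · obtain ⟨k, hk, c', hc', hv⟩ := (ih (m + 1)).mp hx
        exact ⟨k + 1, by omega, c', by simpa using hc', hv⟩
    · rintro ⟨k, hk, c', hc', hv⟩
      cases k with
      | zero =>
        simp only [List.getElem?_cons_zero, Option.some.injEq] at hc'
        subst hc'
        subst hk
        apply List.mem_append.mpr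
        left
        simp [hv]
      | succ k' =>
        simp only [List.getElem?_cons_succ] at hc'
        apply List.mem_append.mpr
        right
        exact (ih (m + 1)).mpr ⟨k', by omega, c', hc', hv⟩

theorem pvRevSpec_sorted (v : String) (fcs : List (List String)) (m : Nat) :
    List.Sorted (· < ·) (pvRevSpec v m fcs) := by
  induction fcs generalizing m with
  | nil => simp [pvRevSpec, List.sorted_nil]
  | cons c rest ih =>
    rw [pvRevSpec]
    by_cases hv : v ∈ c
    · simp only [hv, if_true, List.singleton_append, List.sorted_cons]
      refine ⟨?_, ih (m + 1)⟩
      intro b hb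
      obtain ⟨k, hk, -⟩ := (pvRevSpec_mem v rest (m + 1) b).mp hb
      omega
    · simpa [hv] using ih (m + 1)

-- the inner 'for v in d' fold appends the current index to each key's list
theorem pvRevStep_getD (L : List String) (i : Nat) (r : PySem.Dict String (List Nat))
    (hnd : L.Nodup) (w : String) :
    (L.foldl (fun r v => r.insert v (r.getD v [] ++ [i])) r).getD w []
      = if w ∈ L then r.getD w [] ++ [i] else r.getD w [] := by
  induction L generalizing r with
  | nil => simp
  | cons v0 t ih =>
    simp only [List.foldl_cons]
    rw [List.nodup_cons] at hnd
    rw [ih _ hnd.2]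
    by_cases hw : w = v0
    · subst hw
      have : w ∉ t := hnd.1
      simp [this, PySem.Dict.getD_insert_self]
    · rw [PySem.Dict.getD_insert_of_ne _ _ _ hw]
      by_cases ht : w ∈ t <;> simp [ht, hw]

theorem pvInit_spec (fcs : List (List String)) :
    (pvInit fcs).1 = fcs.map pvCounter ∧
    (pvInit fcs).2.1 = fcs.map (fun c => (c.length : Int)) ∧
    (∀ v, (pvInit fcs).2.2.getD v [] = pvRevSpec v 0 fcs) := by
  suffices h : ∀ (fcs : List (List String)) (cnts0 : List (PySem.Dict String Int))
      (lens0 : List Int) (r : PySem.Dict String (List Nat)),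
      (fcs.foldl (fun st c =>
        let d := pvCounter c
        let rev' := d.keys.foldl (fun r v => r.insert v (r.getD v [] ++ [st.2.1.length])) st.2.2
        (st.1 ++ [d], st.2.1 ++ [(c.length : Int)], rev')) (cnts0, lens0, r))
      = (cnts0 ++ fcs.map pvCounter, lens0 ++ fcs.map (fun c => (c.length : Int)),
         (fcs.foldl (fun st c =>
        let d := pvCounter c
        let rev' := d.keys.foldl (fun r v => r.insert v (r.getD v [] ++ [st.2.1.length])) st.2.2
        (st.1 ++ [d], st.2.1 ++ [(c.length : Int)], rev')) (cnts0, lens0, r)).2.2) ∧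
      ∀ v, ((fcs.foldl (fun st c =>
        let d := pvCounter c
        let rev' := d.keys.foldl (fun r v => r.insert v (r.getD v [] ++ [st.2.1.length])) st.2.2
        (st.1 ++ [d], st.2.1 ++ [(c.length : Int)], rev')) (cnts0, lens0, r)).2.2).getD v []
        = r.getD v [] ++ pvRevSpec v lens0.length fcs by
    obtain ⟨h1, h2⟩ := h fcs [] [] PySem.Dict.empty
    refine ⟨?_, ?_, ?_⟩
    · rw [pvInit, h1]; simp
    · rw [pvInit, h1]; simp
    · intro v
      have := h2 v
      simpa [pvInit, PySem.Dict.getD_empty] using this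
  intro fcs
  induction fcs with
  | nil => intro cnts0 lens0 r; simp [pvRevSpec]
  | cons c rest ih =>
    intro cnts0 lens0 r
    simp only [List.foldl_cons]
    have hkeys : (pvCounter c).keys = PySem.Set.ofList c := by
      have hc2 : pvCounter c = PySem.Dict.counter c :=
        PySem.Dict.foldl_insert_getD_add_one_eq_counter c
      rw [hc2, PySem.Dict.keys_counter]
    have hknd : (pvCounter c).keys.Nodup := by
      rw [hkeys]; exact PySem.Set.nodup_ofList c
    obtain ⟨ih1, ih2⟩ := ih (cnts0 ++ [pvCounter c]) (lens0 ++ [(c.length : Int)])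
      ((pvCounter c).keys.foldl (fun r v => r.insert v (r.getD v [] ++ [lens0.length])) r)
    constructor
    · rw [ih1]; simp
    · intro v
      rw [ih2 v, pvRevStep_getD _ _ _ hknd, pvRevSpec]
      have hmem : v ∈ (pvCounter c).keys ↔ v ∈ c := by
        rw [hkeys]; exact PySem.Set.mem_ofList c v
      by_cases hv : v ∈ c
      · simp [hmem.mpr hv, hv, List.length_append]
      · have : v ∉ (pvCounter c).keys := fun h => hv (hmem.mp h)
        simp [this, hv, List.length_append]

-- ---------- the inner fold over rev[v] ----------
theorem pvDecr_snd (v : String) (d : PySem.Dict String Int) (l : Int) :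
    (pvDecr v (d, l)).2 = if d.contains v then l - 1 else l := by
  by_cases h : d.contains v <;> simp [pvDecr, h]

theorem pvDecr_id (v : String) (d : PySem.Dict String Int) (l : Int)
    (h : d.contains v = false) : pvDecr v (d, l) = (d, l) := by
  simp [pvDecr, h]

theorem pvGetD_list_eq {α : Type} (l : List α) (s : Nat) (dflt d : α)
    (h : l[s]? = some d) : l.getD s dflt = d := by
  simp [List.getD_eq_getElem?_getD, h]

theorem pvRelax_unfold (v : String) (cnts : List (PySem.Dict String Int))
    (lens : List Int) (pend : List Nat) (s : Nat) :
    pvRelax v (cnts, lens, pend) s =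
      if (cnts.getD s PySem.Dict.empty).contains v then
        (cnts.set s (pvDecr v (cnts.getD s PySem.Dict.empty, lens.getD s 0)).1,
         lens.modify s (· - 1),
         if (lens.modify s (· - 1)).getD s 0 == 1 then pvInsort pend s else pend)
      else (cnts, lens, pend) := by
  by_cases h : (cnts.getD s PySem.Dict.empty).contains v <;>
    simp only [pvRelax, pvDecr, h, if_true, Bool.false_eq_true, if_false]

-- pointwise characterisation of the fold over a Nodup index list
theorem pvRelaxFold_spec (v : String) (S : List Nat) (cnts : List (PySem.Dict String Int))
    (lens : List Int) (pend : List Nat) (hnd : S.Nodup) :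
    (∀ j, (S.foldl (pvRelax v) (cnts, lens, pend)).1[j]?
        = if j ∈ S then cnts[j]?.map (fun d => (pvDecr v (d, lens.getD j 0)).1) else cnts[j]?) ∧
    (∀ j, (S.foldl (pvRelax v) (cnts, lens, pend)).2.1[j]?
        = if j ∈ S then lens[j]?.map (fun l => (pvDecr v (cnts.getD j PySem.Dict.empty, l)).2) else lens[j]?) ∧
    (∀ x, x ∈ (S.foldl (pvRelax v) (cnts, lens, pend)).2.2 ↔
        x ∈ pend ∨ (x ∈ S ∧ (cnts.getD x PySem.Dict.empty).contains v ∧ x < lens.length ∧ lens.getD x 0 = 2)) := by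
  induction S generalizing cnts lens pend with
  | nil => simp
  | cons s S' ih =>
    rw [List.nodup_cons] at hnd
    obtain ⟨hs, hnd'⟩ := hnd
    simp only [List.foldl_cons]
    rw [pvRelax_unfold]
    by_cases hct : (cnts.getD s PySem.Dict.empty).contains v
    · rw [if_pos hct]
      have hctE : (cnts[s]?.getD PySem.Dict.empty).contains v = true := by
        rw [← List.getD_eq_getElem?_getD]; exact hct
      set C := cnts.set s (pvDecr v (cnts.getD s PySem.Dict.empty, lens.getD s 0)).1 with hC
      set L := lens.modify s (· - 1) with hL
      set P := if L.getD s 0 == 1 then pvInsort pend s else pend with hP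
      obtain ⟨iha, ihb, ihc⟩ := ih C L P hnd'
      have f1 : ∀ j, j ≠ s → C[j]? = cnts[j]? := by
        intro j hj
        rw [hC]
        exact List.getElem?_set_ne (by omega)
      have f2 : C[s]? = cnts[s]?.map (fun d => (pvDecr v (d, lens.getD s 0)).1) := by
        rw [hC]
        cases hcs : cnts[s]? with
        | none =>
          have : ¬ s < cnts.length := by
            intro h; exact absurd hcs (by simp [List.getElem?_eq_getElem h])
          simp [List.getElem?_set, this]
        | some d =>
          have hlt : s < cnts.length := by
            by_contra h
            rw [List.getElem?_eq_none (by omega)] at hcs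
            exact absurd hcs (by simp)
          have h8 : cnts.getD s PySem.Dict.empty = d := pvGetD_list_eq _ _ _ _ hcs
          have h9 : cnts[s] = d := by
            rw [List.getElem?_eq_getElem hlt] at hcs
            exact Option.some.inj hcs
          simp [List.getElem?_set, hlt, hcs, h8, h9]
      have f3 : ∀ j, j ≠ s → L[j]? = lens[j]? := by
        intro j hj
        rw [hL, List.getElem?_modify]
        simp [Ne.symm hj]
      have f3' : ∀ j, j ≠ s → L.getD j 0 = lens.getD j 0 := by
        intro j hj
        rw [List.getD_eq_getElem?_getD, List.getD_eq_getElem?_getD, f3 j hj]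
      have f4 : L[s]? = lens[s]?.map (· - 1) := by
        rw [hL, List.getElem?_modify]
        simp
      have f5 : ∀ j, j ≠ s → C.getD j PySem.Dict.empty = cnts.getD j PySem.Dict.empty := by
        intro j hj
        rw [List.getD_eq_getElem?_getD, List.getD_eq_getElem?_getD, f1 j hj]
      have f6 : L.length = lens.length := by rw [hL, List.length_modify]
      have fcond : ((L.getD s 0 = 1) ↔ (s < lens.length ∧ lens.getD s 0 = 2)) := by
        by_cases hlt : s < lens.length
        · have : L.getD s 0 = lens.getD s 0 - 1 := by
            rw [List.getD_eq_getElem?_getD, List.getD_eq_getElem?_getD, f4,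
              List.getElem?_eq_getElem hlt]
            simp
          rw [this]
          constructor
          · intro h; exact ⟨hlt, by omega⟩
          · intro h; omega
        · have h1 : L.getD s 0 = 0 := by
            rw [List.getD_eq_getElem?_getD, List.getElem?_eq_none (by omega)]; rfl
          rw [h1]
          constructor
          · intro h; omega
          · intro h; omega
      refine ⟨?_, ?_, ?_⟩
      · intro j
        rw [iha j]
        by_cases hjs : j = s
        · subst hjs
          rw [if_neg hs, if_pos (show j ∈ j :: S' by simp), f2]
        · by_cases hjS : j ∈ S'
          · rw [if_pos hjS, if_pos (by simp [hjS]), f1 j hjs, f3' j hjs]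
          · rw [if_neg hjS, if_neg (by simp [hjs, hjS]), f1 j hjs]
      · intro j
        rw [ihb j]
        by_cases hjs : j = s
        · subst hjs
          rw [if_neg hs, if_pos (show j ∈ j :: S' by simp), f4]
          cases hls : lens[j]? with
          | none => simp
          | some l => simp [pvDecr_snd, hctE]
        · by_cases hjS : j ∈ S'
          · rw [if_pos hjS, if_pos (by simp [hjS]), f3 j hjs, f5 j hjs]
          · rw [if_neg hjS, if_neg (by simp [hjs, hjS]), f3 j hjs]
      · intro x
        rw [ihc x]
        have hPmem : x ∈ P ↔ x ∈ pend ∨ (x = s ∧ s < lens.length ∧ lens.getD s 0 = 2) := by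
          rw [hP]
          by_cases hcond : L.getD s 0 = 1
          · rw [if_pos (beq_iff_eq.mpr hcond), pvInsort_mem]
            have := fcond.mp hcond
            constructor
            · rintro (h | h)
              · right; exact ⟨h, this⟩
              · left; exact h
            · rintro (h | h)
              · right; exact h
              · left; exact h.1
          · rw [if_neg (fun h => hcond (beq_iff_eq.mp h))]
            constructor
            · intro h; left; exact h
            · rintro (h | h)
              · exact h
              · exact absurd (fcond.mpr h.2) hcond
        rw [hPmem]
        constructor
        · rintro ((h | h) | h)
          · left; exact h
          · right
            obtain ⟨hxs, hlt, h2⟩ := h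
            subst hxs
            exact ⟨by simp, hct, hlt, h2⟩
          · obtain ⟨hxS, hc, hlt, h2⟩ := h
            have hxs : x ≠ s := fun he => hs (he ▸ hxS)
            right
            rw [f5 x hxs] at hc
            rw [f6] at hlt
            rw [f3' x hxs] at h2
            exact ⟨by simp [hxS], hc, hlt, h2⟩
        · rintro (h | h)
          · left; left; exact h
          · obtain ⟨hxS, hc, hlt, h2⟩ := h
            rcases List.mem_cons.mp hxS with hxs | hxS'
            · subst hxs
              left; right
              exact ⟨rfl, hlt, h2⟩
            · right
              have hxs : x ≠ s := fun he => hs (he ▸ hxS')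
              refine ⟨hxS', ?_, ?_, ?_⟩
              · rw [f5 x hxs]; exact hc
              · rw [f6]; exact hlt
              · rw [f3' x hxs]; exact h2
    · rw [if_neg hct]
      obtain ⟨iha, ihb, ihc⟩ := ih cnts lens pend hnd'
      have hctf : (cnts.getD s PySem.Dict.empty).contains v = false := by
        simpa using hct
      have hctfE : (cnts[s]?.getD PySem.Dict.empty).contains v = false := by
        rw [← List.getD_eq_getElem?_getD]; exact hctf
      refine ⟨?_, ?_, ?_⟩
      · intro j
        rw [iha j]
        by_cases hjs : j = s
        · subst hjs
          rw [if_neg hs, if_pos (show j ∈ j :: S' by simp)]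
          cases hcs : cnts[j]? with
          | none => simp
          | some d =>
            have h8 : cnts.getD j PySem.Dict.empty = d := pvGetD_list_eq _ _ _ _ hcs
            rw [h8] at hctf
            simp [pvDecr_id v d _ hctf]
        · by_cases hjS : j ∈ S'
          · rw [if_pos hjS, if_pos (by simp [hjS])]
          · rw [if_neg hjS, if_neg (by simp [hjs, hjS])]
      · intro j
        rw [ihb j]
        by_cases hjs : j = s
        · subst hjs
          rw [if_neg hs, if_pos (show j ∈ j :: S' by simp)]
          cases hls : lens[j]? with
          | none => simp
          | some l => simp [pvDecr_snd, hctfE]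
        · by_cases hjS : j ∈ S'
          · rw [if_pos hjS, if_pos (by simp [hjS])]
          · rw [if_neg hjS, if_neg (by simp [hjs, hjS])]
      · intro x
        rw [ihc x]
        constructor
        · rintro (h | h)
          · left; exact h
          · right
            exact ⟨by simp [h.1], h.2⟩
        · rintro (h | h)
          · left; exact h
          · obtain ⟨hxS, hc, hlt, h2⟩ := h
            rcases List.mem_cons.mp hxS with hxs | hxS'
            · subst hxs
              rw [hctf] at hc
              exact absurd hc (by simp)
            · right; exact ⟨hxS', hc, hlt, h2⟩

theorem pvRelaxFold_sorted (v : String) (S : List Nat) (st : List (PySem.Dict String Int) × List Int × List Nat)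
    (h : List.Sorted (· ≤ ·) st.2.2) :
    List.Sorted (· ≤ ·) (S.foldl (pvRelax v) st).2.2 := by
  induction S generalizing st with
  | nil => exact h
  | cons s S' ih =>
    simp only [List.foldl_cons]
    apply ih
    rw [pvRelax]
    dsimp only
    split
    · dsimp only
      split
      · exact pvInsort_sorted _ _ h
      · exact h
    · exact h

theorem pvRelaxFold_pend_len (v : String) (S : List Nat)
    (st : List (PySem.Dict String Int) × List Int × List Nat) :
    (S.foldl (pvRelax v) st).2.2.length ≤ st.2.2.length + S.length := by
  induction S generalizing st with
  | nil => simp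
  | cons s S' ih =>
    simp only [List.foldl_cons]
    have h1 : (pvRelax v st s).2.2.length ≤ st.2.2.length + 1 := by
      rw [pvRelax]
      dsimp only
      split
      · dsimp only
        split
        · rw [pvInsort_length]
        · omega
      · omega
    have := ih (pvRelax v st s)
    simp only [List.length_cons]
    omega

-- under Nodup + completeness, the fold over rev[v] IS the pointwise decrement
theorem pvRelaxFold_eq_map (v : String) (S : List Nat) (cnts : List (PySem.Dict String Int))
    (lens : List Int) (pend : List Nat) (hnd : S.Nodup)
    (hlen : lens.length = cnts.length)
    (hcomp : ∀ j, (cnts.getD j PySem.Dict.empty).contains v → j ∈ S) :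
    (S.foldl (pvRelax v) (cnts, lens, pend)).1 = ((cnts.zip lens).map (pvDecr v)).map (·.1) ∧
    (S.foldl (pvRelax v) (cnts, lens, pend)).2.1 = ((cnts.zip lens).map (pvDecr v)).map (·.2) := by
  obtain ⟨ha, hb, -⟩ := pvRelaxFold_spec v S cnts lens pend hnd
  constructor
  · apply List.ext_getElem?
    intro j
    rw [ha j]
    simp only [List.getElem?_map]
    cases hcj : cnts[j]? with
    | none =>
      have hjge : cnts.length ≤ j := by
        by_contra h
        rw [List.getElem?_eq_getElem (by omega)] at hcj
        exact absurd hcj (by simp)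
      have hz : (cnts.zip lens)[j]? = none :=
        List.getElem?_eq_none (by rw [List.length_zip]; omega)
      simp only [hz, hcj, Option.map_none]
      split <;> rfl
    | some d =>
      have hjl : j < cnts.length := by
        by_contra h
        rw [List.getElem?_eq_none (by omega)] at hcj
        exact absurd hcj (by simp)
      obtain ⟨l, hl⟩ : ∃ l, lens[j]? = some l :=
        ⟨lens[j], List.getElem?_eq_getElem (by omega)⟩
      have hz : (cnts.zip lens)[j]? = some (d, l) :=
        List.getElem?_zip_eq_some.mpr ⟨hcj, hl⟩
      have hgd : cnts.getD j PySem.Dict.empty = d := pvGetD_list_eq _ _ _ _ hcj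
      have hgl : lens.getD j 0 = l := pvGetD_list_eq _ _ _ _ hl
      by_cases hjS : j ∈ S
      · simp [hjS, hcj, hz, hl]
      · have hcf : (cnts.getD j PySem.Dict.empty).contains v = false := by
          by_contra h
          exact hjS (hcomp j (by simpa using h))
        rw [hgd] at hcf
        simp [hjS, hcj, hz, pvDecr_id v d l hcf]
  · apply List.ext_getElem?
    intro j
    rw [hb j]
    simp only [List.getElem?_map]
    cases hlj : lens[j]? with
    | none =>
      have hjge : lens.length ≤ j := by
        by_contra h
        rw [List.getElem?_eq_getElem (by omega)] at hlj
        exact absurd hlj (by simp)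
      have hz : (cnts.zip lens)[j]? = none :=
        List.getElem?_eq_none (by rw [List.length_zip]; omega)
      simp only [hz, hlj, Option.map_none]
      split <;> rfl
    | some l =>
      have hjl : j < lens.length := by
        by_contra h
        rw [List.getElem?_eq_none (by omega)] at hlj
        exact absurd hlj (by simp)
      obtain ⟨d, hd⟩ : ∃ d, cnts[j]? = some d :=
        ⟨cnts[j], List.getElem?_eq_getElem (by omega)⟩
      have hz : (cnts.zip lens)[j]? = some (d, l) :=
        List.getElem?_zip_eq_some.mpr ⟨hd, hlj⟩
      have hgd : cnts.getD j PySem.Dict.empty = d := pvGetD_list_eq _ _ _ _ hd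
      have hgl : lens.getD j 0 = l := pvGetD_list_eq _ _ _ _ hlj
      by_cases hjS : j ∈ S
      · simp [hjS, hlj, hz, hd]
      · have hcf : (cnts.getD j PySem.Dict.empty).contains v = false := by
          by_contra h
          exact hjS (hcomp j (by simpa using h))
        rw [hgd] at hcf
        simp [hjS, hlj, hz, pvDecr_id v d l hcf]

-- ---------- the global invariant and the main loop correspondence ----------
def pvInv (fcs : List (List String)) (cnts : List (PySem.Dict String Int)) (lens : List Int) : Prop :=
  lens = fcs.map (fun c => (c.length : Int)) ∧ List.Forall₂ pvDInv fcs cnts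

-- stepping the whole state by pvDecr matches A's remove_candidate
theorem pvStep_inv (v : String) (fcs : List (List String))
    (cnts : List (PySem.Dict String Int)) (lens : List Int)
    (hinv : pvInv fcs cnts lens) :
    pvInv (remove_candidate fcs v)
      (((cnts.zip lens).map (pvDecr v)).map (·.1))
      (((cnts.zip lens).map (pvDecr v)).map (·.2)) := by
  obtain ⟨hlens, hf2⟩ := hinv
  subst hlens
  induction hf2 with
  | nil => exact ⟨rfl, List.Forall₂.nil⟩
  | @cons c d fcs' cnts' hcd hrest ih =>
    obtain ⟨ihl, ihf⟩ := ih
    obtain ⟨hdinv, hdlen⟩ := pvDecr_inv v c d ((c.length : Int)) hcd rfl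
    refine ⟨?_, ?_⟩
    · simp only [remove_candidate, List.map_cons, List.zip_cons_cons]
      rw [hdlen]
      simpa [remove_candidate] using congrArg (List.cons (((PySem.List.remove? c v).getD c).length : Int)) ihl
    · simp only [remove_candidate, List.map_cons, List.zip_cons_cons]
      exact List.Forall₂.cons hdinv (by simpa [remove_candidate] using ihf)

-- remove_candidate only removes: element-wise subset is preserved
theorem pvRemove_subset (fcs0 fcs : List (List String)) (v : String)
    (h : List.Forall₂ (fun c0 c => ∀ x ∈ c, x ∈ c0) fcs0 fcs) :
    List.Forall₂ (fun c0 c => ∀ x ∈ c, x ∈ c0) fcs0 (remove_candidate fcs v) := by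
  induction h with
  | nil => exact List.Forall₂.nil
  | @cons c0 c fcs0' fcs' hc hrest ih =>
    simp only [remove_candidate, List.map_cons]
    refine List.Forall₂.cons ?_ (by simpa [remove_candidate] using ih)
    intro x hx
    apply hc
    by_cases hv : v ∈ c
    · rw [PySem.List.remove?_eq_some_erase c v hv] at hx
      simp only [Option.getD_some] at hx
      exact (List.erase_sublist (l := c) (a := v)).mem hx
    · rw [(PySem.List.remove?_eq_none_iff c v).mpr hv] at hx
      simpa using hx

-- the main induction: B's worklist loop computes A's loop
theorem pvLoop_eq (fuel : Nat) : ∀ (fcs0 fcs : List (List String))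
    (cnts : List (PySem.Dict String Int)) (lens : List Int)
    (rev : PySem.Dict String (List Nat)) (pending : List Nat)
    (res : PySem.Dict String Int),
    pvInv fcs cnts lens →
    List.Forall₂ (fun c0 c => ∀ x ∈ c, x ∈ c0) fcs0 fcs →
    (∀ v, (rev.getD v []) = pvRevSpec v 0 fcs0) →
    List.Sorted (· ≤ ·) pending →
    (∀ x ∈ pending, x < fcs0.length) →
    (∀ (j : Nat) (c : List String), fcs[j]? = some c → c.length = 1 → j ∈ pending) →
    pvSumLen fcs * (fcs0.length + 1) + pending.length < fuel →
    pvALoop fcs res = pvBLoop fuel cnts lens rev pending res := by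
  induction fuel with
  | zero =>
    intro _ _ _ _ _ _ _ _ _ _ _ _ _ hf
    omega
  | succ fuel ih =>
    intro fcs0 fcs cnts lens rev pending res hinv hsub hrev hsort hbound hcompl hfuel
    have hlens := hinv.1
    have hf2 := hinv.2
    have hlenfcs : fcs.length = fcs0.length := (List.Forall₂.length_eq hsub).symm
    have hclen : cnts.length = fcs.length := (List.Forall₂.length_eq hf2).symm
    have hlenlens : lens.length = fcs.length := by rw [hlens]; simp
    cases pending with
    | nil =>
      have hnone : pvFindSingleton fcs = none := by
        cases hfs : pvFindSingleton fcs with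
        | none => rfl
        | some p =>
          obtain ⟨i, c⟩ := p
          obtain ⟨hg, hl, -⟩ := pvFindSingleton_spec fcs i c hfs
          exact absurd (hcompl i c hg hl) (by simp)
      rw [pvALoop.eq_def, pvBLoop]
      split
      next => rfl
      next i0 c0 h =>
        rw [hnone] at h
        exact absurd h (by simp)
    | cons i t =>
      by_cases hl1 : lens.getD i 0 = 1
      case neg =>
        rw [pvBLoop, if_neg (fun h => hl1 (beq_iff_eq.mp h))]
        refine ih fcs0 fcs cnts lens rev t res hinv hsub hrev
          ((List.sorted_cons.mp hsort).2) (fun x hx => hbound x (by simp [hx])) ?_ ?_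
        · intro j c hj hc
          have hjp := hcompl j c hj hc
          rcases List.mem_cons.mp hjp with hji | hjt
          · exfalso
            have hlj : lens[j]? = some ((c.length : Int)) := by
              rw [hlens, List.getElem?_map, hj]
              rfl
            have : lens.getD j 0 = 1 := by
              rw [pvGetD_list_eq _ _ _ _ hlj, hc]
              rfl
            exact hl1 (hji ▸ this)
          · exact hjt
        · simp only [List.length_cons] at hfuel
          omega
      case pos =>
        obtain ⟨c, hfi, hclen1⟩ : ∃ c, fcs[i]? = some c ∧ c.length = 1 := by
          cases hfi : fcs[i]? with
          | none =>
            exfalso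
            have hge : fcs.length ≤ i := by
              by_contra h
              rw [List.getElem?_eq_getElem (by omega)] at hfi
              exact absurd hfi (by simp)
            have : lens.getD i 0 = 0 := by
              rw [List.getD_eq_getElem?_getD, List.getElem?_eq_none (by omega)]
              rfl
            omega
          | some c =>
            refine ⟨c, rfl, ?_⟩
            have hlj : lens[i]? = some ((c.length : Int)) := by
              rw [hlens, List.getElem?_map, hfi]
              rfl
            have h2 : lens.getD i 0 = ((c.length : Int)) := pvGetD_list_eq _ _ _ _ hlj
            rw [h2] at hl1
            omega
        obtain ⟨x, hx⟩ : ∃ x, c = [x] := by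
          cases c with
          | nil => simp at hclen1
          | cons a t' =>
            cases t' with
            | nil => exact ⟨a, rfl⟩
            | cons b t'' => simp at hclen1
        subst hx
        have hfs : pvFindSingleton fcs = some (i, [x]) := by
          cases hfs0 : pvFindSingleton fcs with
          | none => exact absurd (pvFindSingleton_none fcs hfs0 i [x] hfi) (by simp)
          | some p =>
            obtain ⟨i0, c0⟩ := p
            obtain ⟨hg0, hl0, hmin0⟩ := pvFindSingleton_spec fcs i0 c0 hfs0
            have hi0p : i0 ∈ i :: t := hcompl i0 c0 hg0 hl0
            have hle : i ≤ i0 := by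
              rcases List.mem_cons.mp hi0p with h | h
              · omega
              · exact (List.sorted_cons.mp hsort).1 i0 h
            have hge : ¬ i < i0 := fun h => hmin0 i h [x] hfi rfl
            have hii : i0 = i := by omega
            subst hii
            have hcc : c0 = [x] := by
              rw [hg0] at hfi
              exact Option.some.inj hfi
            subst hcc
            rfl
        obtain ⟨d, hd, hdinv⟩ := pvForall₂_get? pvDInv fcs cnts i [x] hf2 hfi
        have hgdi : cnts.getD i PySem.Dict.empty = d := pvGetD_list_eq _ _ _ _ hd
        have hkeys : ((cnts.getD i PySem.Dict.empty).keys).headD "" = x := by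
          rw [hgdi, pvDInv_singleton_keys x d hdinv]
          rfl
        have hheadx : ([x] : List String).headD "" = x := rfl
        rw [pvBLoop, if_pos (beq_iff_eq.mpr hl1)]
        dsimp only
        rw [hkeys]
        rw [pvALoop.eq_def]
        split
        next h =>
          rw [hfs] at h
          exact absurd h (by simp)
        next i0 c0 h =>
          rw [hfs] at h
          obtain ⟨hii, hcc⟩ := Prod.mk.injEq .. ▸ Option.some.inj h
          subst hii
          subst hcc
          dsimp only
          rw [hheadx]
          set S := rev.getD x [] with hS
          have hrevx : S = pvRevSpec x 0 fcs0 := hrev x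
          have hndS : S.Nodup := by
            rw [hrevx]
            exact List.Pairwise.nodup (pvRevSpec_sorted x fcs0 0)
          have hlenCL : lens.length = cnts.length := by omega
          have hcompS : ∀ j, (cnts.getD j PySem.Dict.empty).contains x → j ∈ S := by
            intro j hcj
            have hjlt : j < cnts.length := by
              by_contra h
              have he : cnts.getD j PySem.Dict.empty = PySem.Dict.empty := by
                rw [List.getD_eq_getElem?_getD, List.getElem?_eq_none (by omega)]
                rfl
              rw [he] at hcj
              simp [PySem.Dict.contains_empty] at hcj
            have hdj : cnts[j]? = some cnts[j] := List.getElem?_eq_getElem hjlt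
            have hgdj : cnts.getD j PySem.Dict.empty = cnts[j] := pvGetD_list_eq _ _ _ _ hdj
            obtain ⟨cj, hcjg, hcjinv⟩ := pvForall₂_get? (flip pvDInv) cnts fcs j cnts[j] hf2.flip hdj
            have hxcj : x ∈ cj := by
              apply hcjinv.2.2
              rw [← PySem.Dict.contains_iff_mem_keys]
              rw [hgdj] at hcj
              exact hcj
            obtain ⟨c0j, hc0j, hsubj⟩ := pvForall₂_get?
              (flip (fun c0 c => ∀ y ∈ c, y ∈ c0)) fcs fcs0 j cj hsub.flip hcjg
            rw [hrevx, pvRevSpec_mem]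
            exact ⟨j, by omega, c0j, hc0j, hsubj x hxcj⟩
          obtain ⟨hA, hB⟩ := pvRelaxFold_eq_map x S cnts lens t hndS hlenCL hcompS
          obtain ⟨-, -, hC⟩ := pvRelaxFold_spec x S cnts lens t hndS
          have hsorted' := pvRelaxFold_sorted x S (cnts, lens, t) ((List.sorted_cons.mp hsort).2)
          have hplen := pvRelaxFold_pend_len x S (cnts, lens, t)
          have hinv' : pvInv (remove_candidate fcs x)
              (S.foldl (pvRelax x) (cnts, lens, t)).1
              (S.foldl (pvRelax x) (cnts, lens, t)).2.1 := by
            rw [hA, hB]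
            exact pvStep_inv x fcs cnts lens hinv
          have hsub' := pvRemove_subset fcs0 fcs x hsub
          have hbound' : ∀ y ∈ (S.foldl (pvRelax x) (cnts, lens, t)).2.2, y < fcs0.length := by
            intro y hy
            rcases (hC y).mp hy with h | h
            · exact hbound y (by simp [h])
            · obtain ⟨hyS, -, -, -⟩ := h
              rw [hrevx, pvRevSpec_mem] at hyS
              obtain ⟨k, hk, c0, hc0, -⟩ := hyS
              have : k < fcs0.length := by
                by_contra hcon
                rw [List.getElem?_eq_none (by omega)] at hc0
                exact absurd hc0 (by simp)
              omega
          have hcompl' : ∀ (j : Nat) (c' : List String),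
              (remove_candidate fcs x)[j]? = some c' → c'.length = 1 →
              j ∈ (S.foldl (pvRelax x) (cnts, lens, t)).2.2 := by
            intro j c' hj' hc'1
            rw [remove_candidate, List.getElem?_map] at hj'
            cases hcjg : fcs[j]? with
            | none => rw [hcjg] at hj'; exact absurd hj' (by simp)
            | some cj =>
              rw [hcjg] at hj'
              simp only [Option.map_some, Option.some.injEq] at hj'
              have hjlt : j < fcs.length := by
                by_contra h
                rw [List.getElem?_eq_none (by omega)] at hcjg
                exact absurd hcjg (by simp)
              by_cases hvin : x ∈ cj
              · -- cj had length 2, became a new singleton: inserted by the fold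
                rw [PySem.List.remove?_eq_some_erase cj x hvin, Option.getD_some] at hj'
                have hlcj : cj.length = 2 := by
                  have h1 : (cj.erase x).length = cj.length - 1 := List.length_erase_of_mem hvin
                  have h2 : 0 < cj.length := List.length_pos_of_mem hvin
                  rw [← hj'] at hc'1
                  omega
                obtain ⟨dj, hdj, hdjinv⟩ := pvForall₂_get? pvDInv fcs cnts j cj hf2 hcjg
                have hgdj : cnts.getD j PySem.Dict.empty = dj := pvGetD_list_eq _ _ _ _ hdj
                have hct : (cnts.getD j PySem.Dict.empty).contains x := by
                  rw [hgdj]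
                  by_contra h
                  have hcf : dj.contains x = false := by simpa using h
                  have := PySem.Dict.getD_of_not_contains (d := dj) (0 : Int) hcf
                  have h1 := hdjinv.2.1 x
                  have h2 := List.count_pos_iff.mpr hvin
                  omega
                have hlj : lens.getD j 0 = 2 := by
                  have hlg : lens[j]? = some ((cj.length : Int)) := by
                    rw [hlens, List.getElem?_map, hcjg]
                    rfl
                  rw [pvGetD_list_eq _ _ _ _ hlg, hlcj]
                  rfl
                exact (hC j).mpr (Or.inr ⟨hcompS j hct, hct, by omega, hlj⟩)
              · -- untouched: it was already a singleton, hence in t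
                rw [(PySem.List.remove?_eq_none_iff cj x).mpr hvin, Option.getD_none] at hj'
                subst hj'
                have hjp := hcompl j cj hcjg hc'1
                rcases List.mem_cons.mp hjp with hji | hjt
                · exfalso
                  subst hji
                  rw [hcjg] at hfi
                  have hcx : cj = [x] := Option.some.inj hfi
                  rw [hcx] at hvin
                  exact hvin (by simp)
                · exact (hC j).mpr (Or.inl hjt)
          refine ih fcs0 (remove_candidate fcs x) _ _ rev _ (res.insert x (i : Int))
            hinv' hsub' hrev hsorted' hbound' hcompl' ?_
          have hdec : pvSumLen (remove_candidate fcs x) < pvSumLen fcs := by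
            have := pvRemove_decreases fcs i [x] hfs
            rw [hheadx] at this
            exact this
          have hSlen : S.length ≤ fcs0.length := by
            rw [hrevx]
            have h1 : (pvRevSpec x 0 fcs0).Nodup := List.Pairwise.nodup (pvRevSpec_sorted x fcs0 0)
            have h2 : ∀ y ∈ pvRevSpec x 0 fcs0, y < fcs0.length := by
              intro y hy
              rw [pvRevSpec_mem] at hy
              obtain ⟨k, hk, c0, hc0, -⟩ := hy
              have : k < fcs0.length := by
                by_contra hcon
                rw [List.getElem?_eq_none (by omega)] at hc0
                exact absurd hc0 (by simp)
              omega
            rw [← List.toFinset_card_of_nodup h1]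
            have hsub2 : (pvRevSpec x 0 fcs0).toFinset ⊆ Finset.range fcs0.length := by
              intro y hy
              rw [List.mem_toFinset] at hy
              exact Finset.mem_range.mpr (h2 y hy)
            simpa using Finset.card_le_card hsub2
          have hmul : pvSumLen (remove_candidate fcs x) * (fcs0.length + 1) + (fcs0.length + 1)
              ≤ pvSumLen fcs * (fcs0.length + 1) := by
            have h1 : pvSumLen (remove_candidate fcs x) + 1 ≤ pvSumLen fcs := by omega
            calc pvSumLen (remove_candidate fcs x) * (fcs0.length + 1) + (fcs0.length + 1)
                = (pvSumLen (remove_candidate fcs x) + 1) * (fcs0.length + 1) := by ring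
              _ ≤ pvSumLen fcs * (fcs0.length + 1) := Nat.mul_le_mul_right _ h1
          have hplen' : (S.foldl (pvRelax x) (cnts, lens, t)).2.2.length
              ≤ t.length + S.length := by simpa using hplen
          simp only [List.length_cons] at hfuel
          omega

-- ===== VERDICT (by name: the statement is the Claim_ definition above) =====
theorem finalize_fields_spec : Claim_equal_finalize_fields := by
  intro fcs hdom
  clear hdom
  unfold Spec_finalize_fields finalize_fields finalize_fields_alt
  obtain ⟨h1, h2, h3⟩ := pvInit_spec fcs
  dsimp only
  rw [h1, h2]
  apply congrArg PySem.Dict.items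
  have hinv : pvInv fcs (fcs.map pvCounter) (fcs.map (fun c => (c.length : Int))) := by
    refine ⟨rfl, ?_⟩
    clear h1 h2 h3
    induction fcs with
    | nil => exact List.Forall₂.nil
    | cons c rest ih => exact List.Forall₂.cons (pvDInv_counter c) ih
  have hsub : List.Forall₂ (fun c0 c => ∀ x ∈ c, x ∈ c0) fcs fcs :=
    List.forall₂_same.mpr (fun c _ x hx => hx)
  have hsort : List.Sorted (· ≤ ·) ((List.range fcs.length).filter
      (fun i => (fcs.map (fun c => (c.length : Int))).getD i 0 == 1)) := by
    refine List.Pairwise.imp (fun h => Nat.le_of_lt h) ?_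
    exact List.Pairwise.filter _ (List.pairwise_lt_range)
  have hbound : ∀ x ∈ (List.range fcs.length).filter
      (fun i => (fcs.map (fun c => (c.length : Int))).getD i 0 == 1), x < fcs.length := by
    intro x hx
    exact List.mem_range.mp (List.mem_filter.mp hx).1
  have hcompl : ∀ (j : Nat) (c : List String), fcs[j]? = some c → c.length = 1 →
      j ∈ (List.range fcs.length).filter
        (fun i => (fcs.map (fun c => (c.length : Int))).getD i 0 == 1) := by
    intro j c hj hc
    have hjlt : j < fcs.length := by
      by_contra h
      rw [List.getElem?_eq_none (by omega)] at hj
      exact absurd hj (by simp)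
    have hlj : (fcs.map (fun c => (c.length : Int)))[j]? = some ((c.length : Int)) := by
      rw [List.getElem?_map, hj]
      rfl
    have hgd : (fcs.map (fun c => (c.length : Int))).getD j 0 = 1 := by
      rw [pvGetD_list_eq _ _ _ _ hlj, hc]
      rfl
    exact List.mem_filter.mpr ⟨List.mem_range.mpr hjlt, beq_iff_eq.mpr hgd⟩
  have hplen : ((List.range fcs.length).filter
      (fun i => (fcs.map (fun c => (c.length : Int))).getD i 0 == 1)).length ≤ fcs.length := by
    calc ((List.range fcs.length).filter _).length ≤ (List.range fcs.length).length :=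
          List.length_filter_le _ _
      _ = fcs.length := List.length_range
  exact pvLoop_eq (pvSumLen fcs * (fcs.length + 1) + fcs.length + 1) fcs fcs
    (fcs.map pvCounter) (fcs.map (fun c => (c.length : Int))) (pvInit fcs).2.2
    ((List.range fcs.length).filter
      (fun i => (fcs.map (fun c => (c.length : Int))).getD i 0 == 1))
    PySem.Dict.empty hinv hsub h3 hsort hbound hcompl (by omega)
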